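-- pv_equiv track=rewrite | github.com/TomaszKolodziejczak/XVI_IO_SLO | slo1.py | count_cycle_data
-- ===== SOURCE A (Python) =====
-- def count_cycle_data(params):
--     n, weights, orig, perm = params
--     odw = [False for _ in range(n)]
--     min_weight = min(weights)
--     cycle_data = []
--
--     for i in range(n):
--         if not odw[i]:
--             min_weight_in_cycle = None
--             weight_sum = 0
--             idx = i
--             cycle_length = 0
--
--             while True:
--                 min_weight_in_cycle = weights[idx] if not min_weight_in_cycle \
--                     else min(min_weight_in_cycle, weights[idx])
--                 weight_sum += weights[idx]
--                 idx = perm[idx]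
--                 odw[idx] = True
--                 cycle_length += 1
--
--                 if idx == i:
--                     break
--
--             cycle_data.append((weight_sum, cycle_length, min_weight_in_cycle))
--
--     return cycle_data, min_weight
-- ===== SOURCE B (Python) =====
-- def count_cycle_data(params):
--     n, weights, orig, perm = params
--     cycle_data = []
--     for i in range(n):
--         # cycle-leader test: walk the cycle; i owns its cycle iff no smaller index on it
--         j = perm[i]
--         while j > i:
--             j = perm[j]
--         if j == i:
--             weight_sum, cycle_length, min_weight_in_cycle = 0, 0, None
--             k = i
--             while True:
--                 w = weights[k]
--                 min_weight_in_cycle = w if not min_weight_in_cycle \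
--                     else min(min_weight_in_cycle, w)
--                 weight_sum += w
--                 cycle_length += 1
--                 k = perm[k]
--                 if k == i:
--                     break
--             cycle_data.append((weight_sum, cycle_length, min_weight_in_cycle))
--     return cycle_data, min(weights)
-- ===== Notes on version B (the rewrite author's own statement) =====
-- stated objective: alternative
-- what changed: A's visited-array bookkeeping is replaced by the classic cycle-leader algorithm: each index walks its cycle to test whether it is the smallest index on it and only such leaders emit their cycle's stats, so no visited list exists at all (O(1) extra space, at the price of re-walking cycles).
-- outside the precondition, e.g. on count_cycle_data((2, [-2, -5, -3], [], [-1, 0])): A returns ([(-5, 2, -3)], -5), B returns ([], -5)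
import Mathlib
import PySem

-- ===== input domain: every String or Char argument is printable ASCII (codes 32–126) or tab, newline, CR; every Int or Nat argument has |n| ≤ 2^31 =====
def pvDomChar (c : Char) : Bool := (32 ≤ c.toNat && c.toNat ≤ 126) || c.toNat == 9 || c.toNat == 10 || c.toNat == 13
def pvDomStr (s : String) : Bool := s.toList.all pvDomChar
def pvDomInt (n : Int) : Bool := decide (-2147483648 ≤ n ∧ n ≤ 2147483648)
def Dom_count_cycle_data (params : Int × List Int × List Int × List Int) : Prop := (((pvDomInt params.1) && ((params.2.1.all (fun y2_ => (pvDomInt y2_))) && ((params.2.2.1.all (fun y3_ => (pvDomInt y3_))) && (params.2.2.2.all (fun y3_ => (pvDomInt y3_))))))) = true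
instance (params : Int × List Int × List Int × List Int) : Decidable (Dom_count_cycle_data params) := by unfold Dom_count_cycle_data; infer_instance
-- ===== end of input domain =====

-- B replaces A's visited-array bookkeeping by the cycle-leader algorithm (an index
-- emits its cycle's stats iff it is the smallest index on its cycle, tested by a walk);
-- objective: alternative (O(1) extra space, no visited list), not faster.

-- `perm[idx]` as the next index; under Pre_ the value is in [0, n), so `.toNat` is exact.
def pvF (perm : List Int) (j : Nat) : Nat := (perm.getD j 0).toNat

-- ===== PORT A =====
-- A's while-loop. `min_weight_in_cycle` starts as Python None and is tested with
-- `if not …` (falsiness): None and 0 take the same branch and `min` is never applied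
-- to a falsy value, so None is encoded as the Int 0 — exact on every admitted input.
-- fuel = n suffices under Pre_ (a cycle of a permutation of range(n) closes within n steps).
def aWalk (weights perm : List Int) (i : Nat) :
    Nat → Nat → Int → Int → Int → List Bool → (Int × Int × Int) × List Bool
  | 0, _, m, s, c, odw => ((s, c, m), odw)
  | fuel+1, idx, m, s, c, odw =>
    let w := weights.getD idx 0
    let m' := if m = 0 then w else min m w
    let s' := s + w
    let idx' := pvF perm idx
    let odw' := odw.set idx' true
    let c' := c + 1
    if idx' = i then ((s', c', m'), odw')
    else aWalk weights perm i fuel idx' m' s' c' odw'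

-- A's `for i in range(n)` loop with the mutable `odw` and `cycle_data` accumulators.
def aOuter (n : Nat) (weights perm : List Int) :
    List Nat → List Bool → List (Int × Int × Int) → List (Int × Int × Int)
  | [], _, acc => acc
  | i :: rest, odw, acc =>
    if odw.getD i false then aOuter n weights perm rest odw acc
    else
      let r := aWalk weights perm i n i 0 0 0 odw
      aOuter n weights perm rest r.2 (acc ++ [r.1])

def count_cycle_data (params : Int × List Int × List Int × List Int) : (List (Int × Int × Int)) × Int :=
  let n := params.1
  let weights := params.2.1
  let perm := params.2.2.2
  let nn := n.toNat
  let min_weight := (PySem.List.min? weights (fun x => x)).getD 0   -- min(weights); Pre_ gives weights ≠ []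
  (aOuter nn weights perm (List.range nn) (List.replicate nn false) [], min_weight)

-- ===== PORT B =====
-- B's leader-test loop `while j > i: j = perm[j]`; fuel = n suffices under Pre_
-- (walking a cycle from perm[i] meets an index ≤ i within the cycle length).
def bCheck (perm : List Int) (i : Nat) : Nat → Nat → Nat
  | 0, j => j
  | fuel+1, j => if i < j then bCheck perm i fuel (pvF perm j) else j

-- B's accumulation walk over the cycle of a leader i (same None-as-0 encoding as in A).
def bWalk (weights perm : List Int) (i : Nat) :
    Nat → Nat → Int → Int → Int → Int × Int × Int
  | 0, _, m, s, c => (s, c, m)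
  | fuel+1, k, m, s, c =>
    let w := weights.getD k 0
    let m' := if m = 0 then w else min m w
    let s' := s + w
    let c' := c + 1
    let k' := pvF perm k
    if k' = i then (s', c', m') else bWalk weights perm i fuel k' m' s' c'

-- B's `for i in range(n)` loop: no visited state, only the output accumulator.
def bOuter (n : Nat) (weights perm : List Int) :
    List Nat → List (Int × Int × Int) → List (Int × Int × Int)
  | [], acc => acc
  | i :: rest, acc =>
    if bCheck perm i n (pvF perm i) = i then
      bOuter n weights perm rest (acc ++ [bWalk weights perm i n i 0 0 0])
    else bOuter n weights perm rest acc

def count_cycle_data_alt (params : Int × List Int × List Int × List Int) : (List (Int × Int × Int)) × Int :=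
  let nn := params.1.toNat
  (bOuter nn params.2.1 params.2.2.2 (List.range nn) [],
   (PySem.List.min? params.2.1 (fun x => x)).getD 0)

-- ===== PRECONDITION & SPEC =====
-- Pre_ restricts to the function's natural domain: weights nonempty (else min(weights)
-- raises ValueError) and either n ≤ 0 (empty range, trivial return) or perm holding, in
-- its first n slots, a permutation of range(n), with weights and perm of length ≥ n.
-- Outside it A diverges or raises (IndexError/ValueError) on almost all inputs; the few
-- inputs A still returns on reach it only through Python's accidental negative-index
-- wraparound, which no caller would specify (and on which B legitimately differs).
def Pre_count_cycle_data (params : Int × List Int × List Int × List Int) : Prop :=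
  params.2.1 ≠ [] ∧
  (params.1 ≤ 0 ∨
    (params.1 ≤ (params.2.1.length : Int) ∧ params.1 ≤ (params.2.2.2.length : Int) ∧
     (∀ j < params.1.toNat, 0 ≤ params.2.2.2.getD j 0 ∧ params.2.2.2.getD j 0 < params.1) ∧
     (∀ a < params.1.toNat, ∀ b < params.1.toNat,
        params.2.2.2.getD a 0 = params.2.2.2.getD b 0 → a = b)))
instance (params : Int × List Int × List Int × List Int) : Decidable (Pre_count_cycle_data params) := by
  unfold Pre_count_cycle_data; infer_instance

def pvWitness_count_cycle_data : (Int × List Int × List Int × List Int) := (2, [3, -1], [], [1, 0])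

def Spec_count_cycle_data (params : Int × List Int × List Int × List Int) (out : (List (Int × Int × Int)) × Int) : Prop := out = count_cycle_data_alt params
instance (params : Int × List Int × List Int × List Int) (out : (List (Int × Int × Int)) × Int) : Decidable (Spec_count_cycle_data params out) := by unfold Spec_count_cycle_data; infer_instance

-- ===== CLAIM (what is proved, stated in full; the proofs are below) =====
def Claim_equal_count_cycle_data : Prop := ∀ (params : Int × List Int × List Int × List Int), Dom_count_cycle_data params → Pre_count_cycle_data params → Spec_count_cycle_data params (count_cycle_data params)

-- ===== LEMMAS AND PROOFS =====

-- i is the smallest index on its cycle (all iterates of perm from i stay ≥ i).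
def isLeader (f : Nat → Nat) (i : Nat) : Prop := ∀ t, i ≤ f^[t] i

-- The list of indices visited by a walk from j that returns to i within `fuel` steps
-- (j first, stop when the successor is i); none if it does not close in time.
def pathF (f : Nat → Nat) (i : Nat) : Nat → Nat → Option (List Nat)
  | 0, _ => none
  | fuel+1, j =>
    if f j = i then some [j] else (pathF f i fuel (f j)).map (j :: ·)

theorem pathF_exists (f : Nat → Nat) (i : Nat) :
    ∀ fuel j, (∃ t, 1 ≤ t ∧ t ≤ fuel ∧ f^[t] j = i) →
      ∃ ws, pathF f i fuel j = some ws := by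
  intro fuel
  induction fuel with
  | zero => rintro j ⟨t, h1, h2, _⟩; omega
  | succ fuel ih =>
    rintro j ⟨t, h1, h2, h3⟩
    by_cases hji : f j = i
    · exact ⟨[j], by simp [pathF, hji]⟩
    · have ht1 : t ≠ 1 := by rintro rfl; simp at h3; exact hji h3
      obtain ⟨t', rfl⟩ : ∃ t', t = t' + 1 := ⟨t - 1, by omega⟩
      rw [Function.iterate_succ_apply] at h3
      obtain ⟨ws', hws'⟩ := ih (f j) ⟨t', by omega, by omega, h3⟩
      exact ⟨j :: ws', by simp [pathF, hji, hws']⟩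

theorem pathF_shape (f : Nat → Nat) (i : Nat) :
    ∀ fuel j ws, pathF f i fuel j = some ws →
      ws.head? = some j ∧ ws.map f = ws.tail ++ [i] := by
  intro fuel
  induction fuel with
  | zero => intro j ws h; simp [pathF] at h
  | succ fuel ih =>
    intro j ws h
    by_cases hji : f j = i
    · simp [pathF, hji] at h
      subst h; simp [hji]
    · simp [pathF, hji] at h
      obtain ⟨ws', hws', rfl⟩ := h
      obtain ⟨h1, h2⟩ := ih (f j) ws' hws'
      refine ⟨rfl, ?_⟩
      obtain ⟨ws'', rfl⟩ : ∃ t, ws' = f j :: t := by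
        cases ws' with
        | nil => simp at h1
        | cons a t => simp at h1; exact ⟨t, by rw [h1]⟩
      simpa using h2

theorem pathF_len_le (f : Nat → Nat) (i : Nat) :
    ∀ fuel j ws, pathF f i fuel j = some ws → ws.length ≤ fuel := by
  intro fuel
  induction fuel with
  | zero => intro j ws h; simp [pathF] at h
  | succ fuel ih =>
    intro j ws h
    by_cases hji : f j = i
    · simp [pathF, hji] at h; subst h; simp
    · simp [pathF, hji] at h
      obtain ⟨ws', hws', rfl⟩ := h
      have := ih (f j) ws' hws'
      simpa using this

theorem pathF_len_pos (f : Nat → Nat) (i : Nat) :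
    ∀ fuel j ws, pathF f i fuel j = some ws → 1 ≤ ws.length := by
  intro fuel j ws h
  obtain ⟨h1, _⟩ := pathF_shape f i fuel j ws h
  cases ws with
  | nil => simp at h1
  | cons a t => simp

theorem pathF_get (f : Nat → Nat) (i : Nat) :
    ∀ fuel j ws, pathF f i fuel j = some ws →
      ∀ t (h : t < ws.length), ws[t] = f^[t] j := by
  intro fuel
  induction fuel with
  | zero => intro j ws h; simp [pathF] at h
  | succ fuel ih =>
    intro j ws h
    by_cases hji : f j = i
    · simp [pathF, hji] at h; subst h
      intro t ht
      simp at ht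
      subst ht; simp
    · simp [pathF, hji] at h
      obtain ⟨ws', hws', rfl⟩ := h
      intro t ht
      cases t with
      | zero => simp
      | succ t =>
        simp only [List.getElem_cons_succ]
        rw [ih (f j) ws' hws' t (by simpa using ht), Function.iterate_succ_apply]

theorem pathF_return (f : Nat → Nat) (i : Nat) :
    ∀ fuel j ws, pathF f i fuel j = some ws → f^[ws.length] j = i := by
  intro fuel
  induction fuel with
  | zero => intro j ws h; simp [pathF] at h
  | succ fuel ih =>
    intro j ws h
    by_cases hji : f j = i
    · simp [pathF, hji] at h; subst h; simpa using hji
    · simp [pathF, hji] at h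
      obtain ⟨ws', hws', rfl⟩ := h
      have := ih (f j) ws' hws'
      simpa [Function.iterate_succ_apply] using this

theorem pathF_ne (f : Nat → Nat) (i : Nat) :
    ∀ fuel j ws, pathF f i fuel j = some ws →
      ∀ t, 1 ≤ t → ∀ (h : t < ws.length), ws[t] ≠ i := by
  intro fuel
  induction fuel with
  | zero => intro j ws h; simp [pathF] at h
  | succ fuel ih =>
    intro j ws h
    by_cases hji : f j = i
    · simp [pathF, hji] at h; subst h
      intro t ht h'; simp at h'; omega
    · simp [pathF, hji] at h
      obtain ⟨ws', hws', rfl⟩ := h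
      intro t ht h'
      obtain ⟨t', rfl⟩ : ∃ t', t = t' + 1 := ⟨t - 1, by omega⟩
      simp only [List.getElem_cons_succ]
      cases Nat.eq_zero_or_pos t' with
      | inl h0 =>
        subst h0
        obtain ⟨hh, _⟩ := pathF_shape f i fuel (f j) ws' hws'
        have hlen : 0 < ws'.length := by simpa using h'
        have : ws'[0] = f j := by
          cases ws' with
          | nil => simp at hh
          | cons a t => simp at hh; simpa using hh
        rw [this]; exact hji
      | inr hpos => exact ih (f j) ws' hws' t' hpos (by simpa using h')

theorem iter_succ (f : Nat → Nat) (m x : Nat) : f^[m] (f x) = f^[m+1] x :=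
  (Function.iterate_succ_apply f m x).symm

-- iterates of a self-map of [0, n) stay in [0, n)
theorem iter_lt (f : Nat → Nat) (n : Nat) (H1 : ∀ j < n, f j < n) :
    ∀ t i, i < n → f^[t] i < n := by
  intro t
  induction t with
  | zero => intro i hi; simpa using hi
  | succ t ih =>
    intro i hi
    rw [Function.iterate_succ_apply']
    exact H1 _ (ih i hi)

-- periodicity of the orbit once a return time L is known
theorem iter_mod (f : Nat → Nat) (i L : Nat) (hL : 0 < L) (hret : f^[L] i = i) :
    ∀ t, f^[t] i = f^[t % L] i := by
  intro t
  induction t using Nat.strong_induction_on with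
  | _ t ih =>
    rcases Nat.lt_or_ge t L with h | h
    · rw [Nat.mod_eq_of_lt h]
    · have h1 : f^[t] i = f^[t - L] i := by
        have : t - L + L = t := by omega
        calc f^[t] i = f^[t - L + L] i := by rw [this]
          _ = f^[t - L] (f^[L] i) := by rw [Function.iterate_add_apply]
          _ = f^[t - L] i := by rw [hret]
      rw [h1, ih (t - L) (by omega), Nat.mod_eq_sub_mod h]

-- pigeonhole: every orbit returns to its start within n steps
theorem orbit_closes (f : Nat → Nat) (n : Nat)
    (H1 : ∀ j < n, f j < n) (H2 : ∀ a < n, ∀ b < n, f a = f b → a = b)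
    (i : Nat) (hi : i < n) : ∃ t, 1 ≤ t ∧ t ≤ n ∧ f^[t] i = i := by
  have hiter : ∀ k, f^[k] i < n := fun k => iter_lt f n H1 k i hi
  have hcancel : ∀ a b, a < b → f^[a] i = f^[b] i → f^[b - a] i = i := by
    intro a
    induction a with
    | zero => intro b _ h; simpa using h.symm
    | succ a ih =>
      intro b hab h
      obtain ⟨b', rfl⟩ : ∃ b', b = b' + 1 := ⟨b - 1, by omega⟩
      rw [Function.iterate_succ_apply', Function.iterate_succ_apply'] at h
      have := H2 _ (hiter a) _ (hiter b') h
      have hres := ih b' (by omega) this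
      simpa using hres
  obtain ⟨a, ha, b, hb, hne, heq⟩ :
      ∃ a ∈ Finset.range (n + 1), ∃ b ∈ Finset.range (n + 1), a ≠ b ∧ f^[a] i = f^[b] i := by
    have := Finset.exists_ne_map_eq_of_card_lt_of_maps_to
      (s := Finset.range (n + 1)) (t := Finset.range n)
      (by simp) (f := fun k => f^[k] i) (fun a _ => by simpa using hiter a)
    obtain ⟨a, ha, b, hb, hne, heq⟩ := this
    exact ⟨a, ha, b, hb, hne, heq⟩
  simp only [Finset.mem_range] at ha hb
  rcases Nat.lt_or_ge a b with hab | hab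
  · exact ⟨b - a, by omega, by omega, hcancel a b hab heq⟩
  · have hba : b < a := by omega
    exact ⟨a - b, by omega, by omega, hcancel b a hba heq.symm⟩

-- reachability along f is symmetric on [0, n) for an injective self-map
theorem reach_symm (f : Nat → Nat) (n : Nat)
    (H1 : ∀ j < n, f j < n) (H2 : ∀ a < n, ∀ b < n, f a = f b → a = b)
    (i j : Nat) (hi : i < n) : (∃ t, f^[t] i = j) → ∃ s, f^[s] j = i := by
  rintro ⟨t, ht⟩
  obtain ⟨L, hL1, hLn, hret⟩ := orbit_closes f n H1 H2 i hi
  have hmod := iter_mod f i L (by omega) hret t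
  by_cases h0 : t % L = 0
  · exact ⟨0, by simp [← ht, hmod, h0]⟩
  · refine ⟨L - t % L, ?_⟩
    have hlt : t % L < L := Nat.mod_lt _ (by omega)
    calc f^[L - t % L] j = f^[L - t % L] (f^[t % L] i) := by rw [← hmod, ht]
      _ = f^[L - t % L + t % L] i := by rw [Function.iterate_add_apply]
      _ = f^[L] i := by congr 1; omega
      _ = i := hret

-- every non-leader lies on the cycle of an earlier leader (strong induction)
theorem nonleader_covered (f : Nat → Nat) (n : Nat)
    (H1 : ∀ j < n, f j < n) (H2 : ∀ a < n, ∀ b < n, f a = f b → a = b) :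
    ∀ i, i < n → ¬ isLeader f i → ∃ l, l < i ∧ isLeader f l ∧ ∃ t, f^[t] l = i := by
  intro i
  induction i using Nat.strong_induction_on with
  | _ i ih =>
    intro hi hnl
    have : ∃ t, f^[t] i < i := by
      by_contra hne
      simp only [not_exists, not_lt] at hne
      exact hnl hne
    obtain ⟨t, ht⟩ := this
    set j := f^[t] i with hj
    have hji : ∃ s, f^[s] j = i := reach_symm f n H1 H2 i j hi ⟨t, rfl⟩
    by_cases hlj : isLeader f j
    · exact ⟨j, ht, hlj, hji⟩
    · obtain ⟨l, hl, hll, a, ha⟩ := ih j ht (by have := iter_lt f n H1 t i hi; omega) hlj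
      obtain ⟨b, hb⟩ := hji
      refine ⟨l, by omega, hll, b + a, ?_⟩
      rw [Function.iterate_add_apply, ha, hb]

-- conversely, an index on an earlier index's cycle is not a leader
theorem covered_nonleader (f : Nat → Nat) (n : Nat)
    (H1 : ∀ j < n, f j < n) (H2 : ∀ a < n, ∀ b < n, f a = f b → a = b)
    (i : Nat) (hi : i < n) :
    (∃ l, l < i ∧ ∃ t, f^[t] l = i) → ¬ isLeader f i := by
  rintro ⟨l, hl, t, ht⟩ hld
  obtain ⟨s, hs⟩ := reach_symm f n H1 H2 l i (by omega) ⟨t, ht⟩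
  have := hld s
  omega

-- evaluation of B's leader-test loop along the orbit
theorem bCheck_spec (perm : List Int) (i : Nat) :
    ∀ fuel j t, t ≤ fuel → (pvF perm)^[t] j ≤ i →
      (∀ s, s < t → i < (pvF perm)^[s] j) →
      bCheck perm i fuel j = (pvF perm)^[t] j := by
  intro fuel
  induction fuel with
  | zero =>
    intro j t ht hle _
    obtain rfl : t = 0 := by omega
    simpa [bCheck] using rfl
  | succ fuel ih =>
    intro j t ht hle hgt
    cases t with
    | zero =>
      simp only [Function.iterate_zero_apply] at hle
      simp [bCheck, Nat.not_lt.mpr hle]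
    | succ t =>
      have h0 : i < j := by simpa using hgt 0 (by omega)
      rw [bCheck, if_pos h0]
      rw [ih (pvF perm j) t (by omega)
        (by rw [iter_succ]; exact hle)
        (fun s hs => by rw [iter_succ]; exact hgt (s+1) (by omega))]
      rw [iter_succ]

theorem bCheck_of_leader (perm : List Int) (n : Nat)
    (H1 : ∀ j < n, pvF perm j < n) (H2 : ∀ a < n, ∀ b < n, pvF perm a = pvF perm b → a = b)
    (k : Nat) (hk : k < n) (hld : isLeader (pvF perm) k) :
    bCheck perm k n (pvF perm k) = k := by
  obtain ⟨ws, hws⟩ := pathF_exists (pvF perm) k n k (orbit_closes (pvF perm) n H1 H2 k hk)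
  set L := ws.length with hLdef
  have hret : (pvF perm)^[L] k = k := pathF_return (pvF perm) k n k ws hws
  have hL1 : 1 ≤ L := pathF_len_pos (pvF perm) k n k ws hws
  have hLn : L ≤ n := pathF_len_le (pvF perm) k n k ws hws
  have hne : ∀ t, 1 ≤ t → t < L → (pvF perm)^[t] k ≠ k := by
    intro t h1 h2
    rw [← pathF_get (pvF perm) k n k ws hws t h2]
    exact pathF_ne (pvF perm) k n k ws hws t h1 h2
  have heval := bCheck_spec perm k n (pvF perm k) (L - 1) (by omega)
    (by rw [iter_succ]
        have : L - 1 + 1 = L := by omega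
        rw [this, hret])
    (by intro s hs
        rw [iter_succ]
        have h1 : (pvF perm)^[s+1] k ≠ k := hne (s+1) (by omega) (by omega)
        have h2 := hld (s+1)
        omega)
  have hconv : (pvF perm)^[L - 1] (pvF perm k) = (pvF perm)^[L] k := by
    rw [iter_succ]; congr 1; omega
  rw [heval, hconv, hret]

theorem bCheck_of_nonleader (perm : List Int) (n : Nat)
    (H1 : ∀ j < n, pvF perm j < n) (H2 : ∀ a < n, ∀ b < n, pvF perm a = pvF perm b → a = b)
    (k : Nat) (hk : k < n) (hnl : ¬ isLeader (pvF perm) k) :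
    bCheck perm k n (pvF perm k) ≠ k := by
  obtain ⟨ws, hws⟩ := pathF_exists (pvF perm) k n k (orbit_closes (pvF perm) n H1 H2 k hk)
  set L := ws.length with hLdef
  have hret : (pvF perm)^[L] k = k := pathF_return (pvF perm) k n k ws hws
  have hL1 : 1 ≤ L := pathF_len_pos (pvF perm) k n k ws hws
  have hLn : L ≤ n := pathF_len_le (pvF perm) k n k ws hws
  have hne : ∀ t, 1 ≤ t → t < L → (pvF perm)^[t] k ≠ k := by
    intro t h1 h2
    rw [← pathF_get (pvF perm) k n k ws hws t h2]
    exact pathF_ne (pvF perm) k n k ws hws t h1 h2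
  have : ∃ t, (pvF perm)^[t] k < k := by
    by_contra hcon
    simp only [not_exists, not_lt] at hcon
    exact hnl hcon
  obtain ⟨t, ht⟩ := this
  have hmod := iter_mod (pvF perm) k L (by omega) hret t
  set t' := t % L with ht'
  have ht'lt : t' < L := Nat.mod_lt _ (by omega)
  have ht'pos : 1 ≤ t' := by
    rcases Nat.eq_zero_or_pos t' with h0 | h; · rw [hmod, h0] at ht; simp at ht
    exact h
  have hP : (pvF perm)^[(t' - 1) + 1] k ≤ k := by
    have : t' - 1 + 1 = t' := by omega
    rw [this, ← hmod]; omega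
  have hex : ∃ s, (pvF perm)^[s + 1] k ≤ k := ⟨t' - 1, hP⟩
  set T := Nat.find hex with hT
  have hTle : T ≤ t' - 1 := Nat.find_min' hex hP
  have hTspec : (pvF perm)^[T + 1] k ≤ k := Nat.find_spec hex
  have heval := bCheck_spec perm k n (pvF perm k) T (by omega)
    (by have : (pvF perm)^[T] (pvF perm k) = (pvF perm)^[T + 1] k := iter_succ _ T k
        rw [this]; exact hTspec)
    (by intro s hs
        rw [iter_succ]
        have := Nat.find_min hex hs
        omega)
  have hconv : (pvF perm)^[T] (pvF perm k) = (pvF perm)^[T + 1] k := iter_succ _ T k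
  rw [heval, hconv]
  exact hne (T + 1) (by omega) (by omega)

-- A's walk along a closed path: the accumulated triple and the marked list
theorem aWalk_path (weights perm : List Int) (i : Nat) :
    ∀ fuel j ws m s c odw, pathF (pvF perm) i fuel j = some ws →
      aWalk weights perm i fuel j m s c odw =
        ((s + (ws.map (fun k => weights.getD k 0)).sum,
          c + ws.length,
          (ws.map (fun k => weights.getD k 0)).foldl
            (fun m v => if m = 0 then v else min m v) m),
         (ws.map (pvF perm)).foldl (fun v k => v.set k true) odw) := by
  intro fuel
  induction fuel with
  | zero => intro j ws m s c odw h; simp [pathF] at h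
  | succ fuel ih =>
    intro j ws m s c odw h
    by_cases hji : pvF perm j = i
    · simp [pathF, hji] at h
      subst h
      simp [aWalk, hji]
    · simp [pathF, hji] at h
      obtain ⟨ws', hws', rfl⟩ := h
      rw [aWalk]
      simp only [hji, if_false]
      rw [ih (pvF perm j) ws' _ _ _ _ hws']
      simp [add_assoc, add_comm, add_left_comm]

-- B's walk along the same closed path: the same triple, no marks
theorem bWalk_path (weights perm : List Int) (i : Nat) :
    ∀ fuel j ws m s c, pathF (pvF perm) i fuel j = some ws →
      bWalk weights perm i fuel j m s c =
        (s + (ws.map (fun k => weights.getD k 0)).sum,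
         c + ws.length,
         (ws.map (fun k => weights.getD k 0)).foldl
           (fun m v => if m = 0 then v else min m v) m) := by
  intro fuel
  induction fuel with
  | zero => intro j ws m s c h; simp [pathF] at h
  | succ fuel ih =>
    intro j ws m s c h
    by_cases hji : pvF perm j = i
    · simp [pathF, hji] at h
      subst h
      simp [bWalk, hji]
    · simp [pathF, hji] at h
      obtain ⟨ws', hws', rfl⟩ := h
      rw [bWalk]
      simp only [hji, if_false]
      rw [ih (pvF perm j) ws' _ _ _ hws']
      simp [add_assoc, add_comm, add_left_comm]

theorem replicate_false_getD (m j : Nat) : (List.replicate m false).getD j false = false := by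
  rw [List.getD_eq_getElem?_getD, List.getElem?_replicate]
  split <;> rfl

-- getD through a single in-range set
theorem setTrue_getD (odw : List Bool) (k j : Nat) (hk : k < odw.length) :
    (odw.set k true).getD j false = (decide (j = k) || odw.getD j false) := by
  by_cases hjk : j = k
  · subst hjk
    simp [List.getD, hk]
  · simp [List.getD, List.getElem?_set_ne (by omega : k ≠ j), hjk]

-- getD through a fold of in-range sets: marked iff previously marked or in the list
theorem marks_getD :
    ∀ (ks : List Nat) (odw : List Bool), (∀ k ∈ ks, k < odw.length) → ∀ j,
      ((ks.foldl (fun v k => v.set k true) odw).getD j false = true ↔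
        (j ∈ ks ∨ odw.getD j false = true)) := by
  intro ks
  induction ks with
  | nil => intro odw _ j; simp
  | cons k ks ih =>
    intro odw hlen j
    simp only [List.foldl_cons]
    rw [ih (odw.set k true)
      (fun x hx => by rw [List.length_set]; exact hlen x (by simp [hx]))]
    rw [setTrue_getD odw k j (hlen k (by simp))]
    simp only [Bool.or_eq_true, decide_eq_true_eq, List.mem_cons]
    tauto

theorem marks_length : ∀ (ks : List Nat) (odw : List Bool),
    (ks.foldl (fun v k => v.set k true) odw).length = odw.length := by
  intro ks
  induction ks with
  | nil => intro odw; rfl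
  | cons k ks ih => intro odw; simp [List.foldl_cons, ih]

-- the two outer loops in lock-step: A's visited test ≡ B's leader test
theorem outer_eq (weights perm : List Int) (n : Nat)
    (H1 : ∀ j < n, pvF perm j < n)
    (H2 : ∀ a < n, ∀ b < n, pvF perm a = pvF perm b → a = b) :
    ∀ (m k : Nat) (odw : List Bool) (acc : List (Int × Int × Int)),
      k + m = n → odw.length = n →
      (∀ j, odw.getD j false = true ↔
        ∃ l, l < k ∧ isLeader (pvF perm) l ∧ ∃ t, (pvF perm)^[t] l = j) →
      aOuter n weights perm (List.range' k m) odw acc =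
        bOuter n weights perm (List.range' k m) acc := by
  intro m
  induction m with
  | zero => intro k odw acc _ _ _; rfl
  | succ m ih =>
    intro k odw acc hkm hlen hinv
    have hk : k < n := by omega
    rw [List.range'_succ, aOuter, bOuter]
    obtain ⟨ws, hws⟩ :=
      pathF_exists (pvF perm) k n k (orbit_closes (pvF perm) n H1 H2 k hk)
    have hwmem : ∀ x ∈ ws, ∃ t, (pvF perm)^[t] k = x := by
      intro x hx
      obtain ⟨t, h1, h2⟩ := List.getElem_of_mem hx
      exact ⟨t, by rw [← pathF_get (pvF perm) k n k ws hws t h1, h2]⟩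
    have hmemw : ∀ t, (pvF perm)^[t] k ∈ ws := by
      intro t
      have hret : (pvF perm)^[ws.length] k = k := pathF_return (pvF perm) k n k ws hws
      have hL1 : 1 ≤ ws.length := pathF_len_pos (pvF perm) k n k ws hws
      have hmod := iter_mod (pvF perm) k ws.length (by omega) hret t
      rw [hmod, ← pathF_get (pvF perm) k n k ws hws (t % ws.length)
        (Nat.mod_lt _ (by omega))]
      exact List.getElem_mem _
    have hmapmem : ∀ x, x ∈ ws.map (pvF perm) ↔ x ∈ ws := by
      obtain ⟨hh, hm⟩ := pathF_shape (pvF perm) k n k ws hws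
      obtain ⟨tl, rfl⟩ : ∃ tl, ws = k :: tl := by
        cases ws with
        | nil => simp at hh
        | cons a tl => simp at hh; exact ⟨tl, by rw [hh]⟩
      intro x
      rw [hm]
      simp [or_comm]
    by_cases hld : isLeader (pvF perm) k
    · have hfalse : odw.getD k false = false := by
        rcases Bool.eq_false_or_eq_true (odw.getD k false) with h | h
        · obtain ⟨l, hl, _, ht⟩ := (hinv k).mp h
          exact absurd hld (covered_nonleader (pvF perm) n H1 H2 k hk ⟨l, hl, ht⟩)
        · exact h
      rw [hfalse]
      rw [if_pos (bCheck_of_leader perm n H1 H2 k hk hld)]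
      simp only [Bool.false_eq_true, if_false]
      have hA := aWalk_path weights perm k n k ws 0 0 0 odw hws
      have hB := bWalk_path weights perm k n k ws 0 0 0 hws
      rw [hA, hB]
      simp only
      apply ih (k + 1) _ _ (by omega)
      · rw [marks_length]; exact hlen
      · intro j
        rw [marks_getD (ws.map (pvF perm)) odw
          (by intro x hx
              rw [hlen]
              obtain ⟨t, ht⟩ := hwmem _ ((hmapmem x).mp hx)
              rw [← ht]
              exact iter_lt (pvF perm) n H1 t k hk) j]
        rw [hinv j]
        constructor
        · rintro (h | ⟨l, hl, h2, h3⟩)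
          · obtain ⟨t, ht⟩ := hwmem _ ((hmapmem j).mp h)
            exact ⟨k, by omega, hld, t, ht⟩
          · exact ⟨l, by omega, h2, h3⟩
        · rintro ⟨l, hl, h2, t, h3⟩
          rcases Nat.lt_or_ge l k with hlk | hlk
          · exact Or.inr ⟨l, hlk, h2, t, h3⟩
          · obtain rfl : l = k := by omega
            exact Or.inl ((hmapmem j).mpr (h3 ▸ hmemw t))
    · have htrue : odw.getD k false = true := by
        rw [hinv k]
        obtain ⟨l, h1, h2, h3⟩ := nonleader_covered (pvF perm) n H1 H2 k hk hld
        exact ⟨l, h1, h2, h3⟩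
      rw [htrue]
      rw [if_neg (bCheck_of_nonleader perm n H1 H2 k hk hld)]
      simp only [if_true]
      apply ih (k + 1) odw acc (by omega) hlen
      intro j
      rw [hinv j]
      constructor
      · rintro ⟨l, h1, h2, h3⟩; exact ⟨l, by omega, h2, h3⟩
      · rintro ⟨l, h1, h2, h3⟩
        rcases Nat.lt_or_ge l k with hlk | hlk
        · exact ⟨l, hlk, h2, h3⟩
        · obtain rfl : l = k := by omega
          exact absurd h2 hld

-- ===== VERDICT (by name: the statement is the Claim_ definition above) =====
theorem count_cycle_data_spec : Claim_equal_count_cycle_data := by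
  intro params _ hpre
  obtain ⟨n, weights, orig, perm⟩ := params
  obtain ⟨_, hrest⟩ := hpre
  unfold Spec_count_cycle_data count_cycle_data count_cycle_data_alt
  simp only
  rcases hrest with hle | ⟨h2, h3, h4, h5⟩
  · have h0 : n.toNat = 0 := Int.toNat_of_nonpos hle
    rw [h0]
    rfl
  simp only at h2 h3 h4 h5
  have H1 : ∀ j < n.toNat, pvF perm j < n.toNat := by
    intro j hj
    have := h4 j hj
    unfold pvF
    omega
  have H2 : ∀ a < n.toNat, ∀ b < n.toNat, pvF perm a = pvF perm b → a = b := by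
    intro a ha b hb hab
    have hva := h4 a ha
    have hvb := h4 b hb
    apply h5 a ha b hb
    unfold pvF at hab
    omega
  have hmain := outer_eq weights perm n.toNat H1 H2 n.toNat 0
    (List.replicate n.toNat false) [] (by omega) (by simp)
    (by intro j
        constructor
        · intro h
          rw [replicate_false_getD] at h
          cases h
        · rintro ⟨l, hl, _⟩; omega)
  rw [List.range_eq_range']
  rw [hmain]
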